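-- pv_equiv track=rewrite | github.com/bkpawar/VedicCrypto | src/main.py | generate_full_pattern
-- ===== SOURCE A (Python) =====
-- def generate_full_pattern(sec):
--     pattern = []
--     current_line = [1, 2, 2, 1, 1, 2, 3, 3, 2, 1, 1, 2, 3]
--     while True:
--         pattern.extend(current_line)
--         if max(current_line) >= len(sec.split()):
--             break
--         current_line = [x + 1 for x in current_line]
--     return pattern
-- ===== SOURCE B (Python) =====
-- def generate_full_pattern(sec):
--     base = [1, 2, 2, 1, 1, 2, 3, 3, 2, 1, 1, 2, 3]
--     total = 13 * max(1, len(sec.split()) - 2)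
--     return [base[k % 13] + k // 13 for k in range(total)]
-- ===== Notes on version B (the rewrite author's own statement) =====
-- stated objective: simpler
-- what changed: Replaces A's whole-line state (extend pattern, test max, increment every element, repeat) by a single flat indexed pass: the total output length 13*max(1, words-2) is computed in closed form and element k is obtained pointwise by divmod, base[k % 13] + k // 13 - no line list is ever built or mutated.
import Mathlib
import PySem

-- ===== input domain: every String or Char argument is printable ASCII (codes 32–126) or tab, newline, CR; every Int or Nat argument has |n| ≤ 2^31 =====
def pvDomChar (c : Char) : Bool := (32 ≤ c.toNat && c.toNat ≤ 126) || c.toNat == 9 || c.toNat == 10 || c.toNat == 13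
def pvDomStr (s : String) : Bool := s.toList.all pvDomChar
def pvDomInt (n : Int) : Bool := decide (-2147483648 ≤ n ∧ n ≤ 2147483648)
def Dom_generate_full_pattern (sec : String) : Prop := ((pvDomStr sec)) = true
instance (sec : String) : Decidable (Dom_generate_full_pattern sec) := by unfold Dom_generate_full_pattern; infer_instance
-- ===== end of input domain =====

-- B drops A's line state entirely: closed-form total length and a pointwise divmod formula per index (objective: simpler).

-- ===== PORT A =====
-- the constant starting line
def gfpBase : List Int := [1, 2, 2, 1, 1, 2, 3, 3, 2, 1, 1, 2, 3]

-- termination helper: max of the incremented line is max + 1 (cited by decreasing_by)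
theorem gfp_foldl_max_add_one (t : List Int) (x : Int) :
    (t.map (fun y => y + 1)).foldl max (x + 1) = t.foldl max x + 1 := by
  induction t generalizing x with
  | nil => simp
  | cons a t ih =>
    simp only [List.map_cons, List.foldl_cons]
    rw [show max (x + 1) (a + 1) = max x a + 1 by omega]
    exact ih _

-- the 'while True' loop of A: extend pattern, break when max(current) ≥ n, else increment the line
def gfpLoop (n : Int) (pattern cur : List Int) : List Int :=
  match h : PySem.List.max? cur (fun y => y) with
  | none => pattern ++ cur   -- empty line: Python's max would raise; never reached (the line stays nonempty)
  | some m =>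
    if m ≥ n then pattern ++ cur
    else gfpLoop n (pattern ++ cur) (cur.map (fun x => x + 1))
termination_by (n - (PySem.List.max? cur (fun y => y)).getD n).toNat
decreasing_by
  cases cur with
  | nil => simp [PySem.List.max?] at h
  | cons a t =>
    rw [PySem.List.max?_id_cons] at h
    have hm : t.foldl max a = m := by injection h
    simp [PySem.List.max?_id_cons, gfp_foldl_max_add_one, hm]
    omega

def generate_full_pattern (sec : String) : List Int :=
  gfpLoop ((PySem.Str.split₀ sec).length : Int) [] gfpBase

-- ===== PORT B =====
-- base[k % 13] via pyGet?; `.getD 0` is exact since 0 ≤ k % 13 < 13 is always in range (never none)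
def generate_full_pattern_alt (sec : String) : List Int :=
  let total : Int := 13 * max 1 (((PySem.Str.split₀ sec).length : Int) - 2)
  (PySem.List.pyRange 0 total 1).map
    (fun k => (PySem.List.pyGet? gfpBase (PySem.Int.mod k 13)).getD 0 + PySem.Int.floordiv k 13)

-- ===== PRECONDITION & SPEC =====
def Spec_generate_full_pattern (sec : String) (out : List Int) : Prop := out = generate_full_pattern_alt sec
instance (sec : String) (out : List Int) : Decidable (Spec_generate_full_pattern sec out) := by unfold Spec_generate_full_pattern; infer_instance

-- ===== CLAIM =====
def Claim_equal_generate_full_pattern : Prop := ∀ (sec : String), Dom_generate_full_pattern sec → Spec_generate_full_pattern sec (generate_full_pattern sec)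

-- ===== LEMMAS AND PROOFS =====

-- max of the j-shifted base line is 3 + j
theorem gfp_max_line (j : Int) :
    PySem.List.max? (gfpBase.map (fun x => x + j)) (fun y => y) = some (3 + j) := by
  simp [gfpBase, List.map, PySem.List.max?_id_cons, List.foldl]

theorem gfp_line_succ (j : Int) :
    (gfpBase.map (fun x => x + j)).map (fun x => x + 1) = gfpBase.map (fun x => x + (j + 1)) := by
  simp [List.map_map]

-- loop characterisation: starting from the j-shifted line, the loop appends lines j, j+1, … up to max (j+1) (n-2)
theorem gfpLoop_eq (t : Nat) (n j : Int) (p : List Int) (ht : (n - 3 - j).toNat ≤ t) :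
    gfpLoop n p (gfpBase.map (fun x => x + j)) =
      p ++ (PySem.List.pyRange j (max (j + 1) (n - 2)) 1).flatMap
             (fun i => gfpBase.map (fun x => x + i)) := by
  induction t generalizing j p with
  | zero =>
    have hstop : 3 + j ≥ n := by omega
    rw [gfpLoop, gfp_max_line]
    simp only [ge_iff_le, if_pos (by omega : n ≤ 3 + j)]
    have hmax : max (j + 1) (n - 2) = j + 1 := by omega
    rw [hmax, PySem.List.pyRange_one_singleton]
    simp
  | succ t ih =>
    rw [gfpLoop, gfp_max_line]
    by_cases hstop : 3 + j ≥ n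
    · simp only [ge_iff_le, if_pos (by omega : n ≤ 3 + j)]
      have hmax : max (j + 1) (n - 2) = j + 1 := by omega
      rw [hmax, PySem.List.pyRange_one_singleton]
      simp
    · simp only [ge_iff_le, if_neg (by omega : ¬ n ≤ 3 + j)]
      rw [gfp_line_succ, ih (j + 1) (p ++ gfpBase.map (fun x => x + j)) (by omega)]
      have h1 : max (j + 1 + 1) (n - 2) = n - 2 := by omega
      have h2 : max (j + 1) (n - 2) = n - 2 := by omega
      rw [h1, h2, PySem.List.pyRange_one_cons (by omega : j < n - 2)]
      simp [List.flatMap_cons, List.append_assoc]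

-- one 13-block of B's flat indexing equals one shifted line
theorem gfp_block_flat (m : Int) :
    (PySem.List.pyRange (13 * m) (13 * m + 13) 1).map
        (fun k => (PySem.List.pyGet? gfpBase (PySem.Int.mod k 13)).getD 0 + PySem.Int.floordiv k 13)
      = gfpBase.map (fun x => x + m) := by
  have hmod : ∀ j : Int, 0 ≤ j → j < 13 → PySem.Int.mod (13 * m + j) 13 = j := by
    intro j h0 h13
    rw [PySem.Int.mod_eq_emod_of_pos (by norm_num)]
    omega
  have hdiv : ∀ j : Int, 0 ≤ j → j < 13 → PySem.Int.floordiv (13 * m + j) 13 = m := by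
    intro j h0 h13
    rw [PySem.Int.floordiv_eq_ediv_of_pos (by norm_num)]
    omega
  rw [PySem.List.pyRange_one, show ((13 * m + 13) - 13 * m).toNat = 13 by omega]
  simp only [List.map_map]
  apply List.ext_getElem
  · simp [gfpBase]
  · intro k hk hk'
    simp only [List.getElem_map, Function.comp_apply, List.getElem_range]
    have hkl : k < 13 := by simpa [gfpBase] using hk'
    rw [hmod _ (by positivity) (by exact_mod_cast hkl), hdiv _ (by positivity) (by exact_mod_cast hkl)]
    rw [PySem.List.pyGet?_natCast]
    interval_cases k <;> simp [gfpBase]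

-- B's flat map over 13*L indices equals the flatMap over L shifted lines
theorem gfp_flat_eq (t : Nat) (L : Int) (hL : L.toNat ≤ t) :
    (PySem.List.pyRange 0 (13 * L) 1).map
        (fun k => (PySem.List.pyGet? gfpBase (PySem.Int.mod k 13)).getD 0 + PySem.Int.floordiv k 13)
      = (PySem.List.pyRange 0 L 1).flatMap (fun i => gfpBase.map (fun x => x + i)) := by
  induction t generalizing L with
  | zero =>
    have : L ≤ 0 := by omega
    rw [PySem.List.pyRange_one_eq_nil (by omega), PySem.List.pyRange_one_eq_nil this]
    simp
  | succ t ih =>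
    by_cases h : L ≤ 0
    · rw [PySem.List.pyRange_one_eq_nil (by omega), PySem.List.pyRange_one_eq_nil h]
      simp
    · have hL1 : L = (L - 1) + 1 := by ring
      rw [hL1, show (13 : Int) * ((L-1)+1) = 13 * (L-1) + 13 by ring,
          PySem.List.pyRange_one_append 0 (13 * (L-1)) (13 * (L-1) + 13) (by omega) (by omega),
          PySem.List.pyRange_one_succ_right (by omega : (0:Int) ≤ L - 1)]
      rw [List.map_append, ih (L - 1) (by omega), gfp_block_flat]
      simp

-- ===== VERDICT =====
theorem generate_full_pattern_spec : Claim_equal_generate_full_pattern := by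
  intro sec _
  unfold Spec_generate_full_pattern generate_full_pattern generate_full_pattern_alt
  set n : Int := ((PySem.Str.split₀ sec).length : Int) with hn
  have hn0 : 0 ≤ n := by positivity
  have hbase : gfpBase = gfpBase.map (fun x => x + (0 : Int)) := by decide
  conv_lhs => rw [hbase]
  rw [gfpLoop_eq (n - 3 - 0).toNat n 0 [] (le_refl _)]
  rw [show max (0 + 1) (n - 2) = max 1 (n - 2) from by omega]
  rw [← gfp_flat_eq (max 1 (n - 2)).toNat _ (le_refl _)]
  simp
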